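/- CARRIED OVER by tools/port_base_units.py (renaming only) from proofs.vorbis/Vorbis/Spec/Units, GENERATED there by farm/mkstatement.py from design/units.tsv (unit `ldexp`) and the Specs of Vorbis/Spec/*.lean — do not edit.
   THE STATEMENT of the proof unit `ldexp`: the function `ldexp` (47 instructions) satisfies its contract,
   given the contracts of its callees. What the names mean: Vorbis/Spec/Basic.lean. The theorem to prove:
   `theorem ldexp_ok : ProgX.Base.Spec.ldexp.Statement`. -/
import ProgX.Base.Spec.Libm
namespace ProgX.Base.Spec.ldexp
open X86 X86.User Asan

/-- The statement of unit `ldexp`. -/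
def Statement : Prop :=
  ∀ (Lay : Layout) (_hLay : Lay.hi = 0x1000000) (μ : Microarch) (_hμ : UserX.MicroOK μ) (u₀ : State)
    (_hcode : HasCodeNat Lay u₀ ProgX.Base.L.ldexp.entry ProgX.Base.Code.code_ldexp.nat ProgX.Base.L.ldexp.size)
    (_h_two_to : ∀ (others : List Obj) (frames : List (Nat × FrameLayout)), Calls Lay μ ProgX.Base.WayInv (ProgX.Base.conv u₀) ProgX.Base.L.two_to.entry (ProgX.Base.Spec.two_to.spec others frames)),
    ∀ (others : List Obj) (frames : List (Nat × FrameLayout)), Calls Lay μ ProgX.Base.WayInv (ProgX.Base.conv u₀) ProgX.Base.L.ldexp.entry (ProgX.Base.Spec.ldexp.spec others frames)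

end ProgX.Base.Spec.ldexp
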